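-- pv_equiv track=rewrite | github.com/Vum-Si/OMP | omp_server/service_conf/ser_conf_serializers.py | get_ser_fields
-- ===== SOURCE A (Python) =====
-- def get_ser_fields(ser_field):
--     """
--     install_detail_args.username,install_detail_args.password
--     转 install_detail_args.username.password
--     install_detail_args.username.password,install_detail_args.base_dir
--     转 install_detail_args.username.password.base_dir
--     """
--     new_ls = []
--     pre = None
--     for i in sorted(ser_field):
--         filed_ls = i.split(".")
--         if filed_ls[0] == pre:
--             new_ls[-1] = f'{new_ls[-1]}.{".".join(filed_ls[1:])}'
--         else:
--             pre = filed_ls[0]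
--             new_ls.append(i)
--     return new_ls
-- ===== SOURCE B (Python) =====
-- def get_ser_fields(ser_field):
--     items = sorted(ser_field)
--     out = []
--     i = 0
--     n = len(items)
--     while i < n:
--         key = items[i].split(".")[0]
--         j = i + 1
--         while j < n and items[j].split(".")[0] == key:
--             j += 1
--         suffixes = [".".join(m.split(".")[1:]) for m in items[i + 1:j]]
--         out.append(".".join([items[i]] + suffixes))
--         i = j
--     return out
-- ===== Notes on version B (the rewrite author's own statement) =====
-- stated objective: simpler
-- what changed: A makes a single running-prefix pass that keeps a 'pre' variable and repeatedly rewrites the last emitted element in place; B scans the sorted list run by run (each run = maximal block of consecutive items sharing the first dotted component) and emits one '.'-joined string per run, with no mutation of already-emitted output.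
import Mathlib
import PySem

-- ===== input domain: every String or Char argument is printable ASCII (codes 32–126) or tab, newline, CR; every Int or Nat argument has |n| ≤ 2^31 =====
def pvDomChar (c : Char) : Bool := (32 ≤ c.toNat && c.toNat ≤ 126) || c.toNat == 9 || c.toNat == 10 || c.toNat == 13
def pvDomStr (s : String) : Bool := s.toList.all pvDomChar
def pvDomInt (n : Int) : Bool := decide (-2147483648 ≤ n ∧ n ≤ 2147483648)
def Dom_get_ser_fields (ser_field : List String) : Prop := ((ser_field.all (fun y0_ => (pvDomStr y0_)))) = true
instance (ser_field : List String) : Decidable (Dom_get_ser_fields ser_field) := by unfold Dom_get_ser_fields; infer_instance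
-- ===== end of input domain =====

-- B replaces A's single running-prefix pass (which keeps a 'pre' variable and rewrites the
-- last emitted element in place) by a group-then-emit decomposition: scan the sorted list
-- run by run (each run = consecutive items sharing the first dotted component) and emit one
-- joined string per run.  Objective: simpler/alternative, same cost.

-- s.split(".") : sep is the literal "." (nonempty), so Python never raises; split? is none only for sep = "".
def pvSplit (s : String) : List String := (PySem.Str.split? s ".").getD []

-- ===== PORT A =====
-- f'{a}.{b}' is ported as '.'.join([a, b]) (exact: both concatenate with a single dot).
def get_ser_fields (ser_field : List String) : List String :=
  ((PySem.List.sorted ser_field (fun x => x) false).foldl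
    (fun (st : List String × Option String) (i : String) =>
      let filed_ls := pvSplit i
      if some (filed_ls.headD "") == st.2 then
        -- new_ls[-1] = f'{new_ls[-1]}.{".".join(filed_ls[1:])}'
        (st.1.dropLast ++
           [PySem.Str.join "." [st.1.getLastD "", PySem.Str.join "." filed_ls.tail]], st.2)
      else
        (st.1 ++ [i], some (filed_ls.headD "")))
    ([], none)).1

-- ===== PORT B =====
-- items[k].split(".")[0] — the first dotted component used as the run key
def pvComp (s : String) : String := (pvSplit s).headD ""
-- ".".join(m.split(".")[1:]) — the suffix appended for each later member of a run
def pvSuffix (s : String) : String := PySem.Str.join "." (pvSplit s).tail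

-- Source B's outer while loop over runs: each iteration consumes the maximal run of items whose
-- first component equals the head's, emits one '.'-joined string, and continues past it.
def pvEmit : List String → List String
  | [] => []
  | x :: rest =>
    let key := pvComp x
    PySem.Str.join "." (x :: (rest.takeWhile (fun m => pvComp m == key)).map pvSuffix)
      :: pvEmit (rest.dropWhile (fun m => pvComp m == key))
termination_by l => l.length
decreasing_by
  simp only [List.length_cons]
  exact Nat.lt_succ_of_le (List.length_dropWhile_le _ _)

def get_ser_fields_alt (ser_field : List String) : List String :=
  pvEmit (PySem.List.sorted ser_field (fun x => x) false)

-- ===== PRECONDITION & SPEC =====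
def Spec_get_ser_fields (ser_field : List String) (out : List String) : Prop := out = get_ser_fields_alt ser_field
instance (ser_field : List String) (out : List String) : Decidable (Spec_get_ser_fields ser_field out) := by unfold Spec_get_ser_fields; infer_instance

-- ===== CLAIM (what is proved, stated in full; the proofs are below) =====
def Claim_equal_get_ser_fields : Prop := ∀ (ser_field : List String), Dom_get_ser_fields ser_field → Spec_get_ser_fields ser_field (get_ser_fields ser_field)

-- ===== LEMMAS AND PROOFS =====

-- A's per-item step, named so the lemmas can speak about it.
def pvStepA (st : List String × Option String) (i : String) : List String × Option String :=
  let filed_ls := pvSplit i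
  if some (filed_ls.headD "") == st.2 then
    (st.1.dropLast ++
       [PySem.Str.join "." [st.1.getLastD "", PySem.Str.join "." filed_ls.tail]], st.2)
  else
    (st.1 ++ [i], some (filed_ls.headD ""))

theorem get_ser_fields_eq_fold (ser_field : List String) :
    get_ser_fields ser_field
      = ((PySem.List.sorted ser_field (fun x => x) false).foldl pvStepA ([], none)).1 := rfl

-- unfolding equations for pvEmit (it carries a termination_by, so rw [pvEmit] is unavailable)
theorem pvEmit_nil : pvEmit [] = [] := by rw [pvEmit.eq_def]

theorem pvEmit_cons (x : String) (rest : List String) :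
    pvEmit (x :: rest)
      = PySem.Str.join "." (x :: (rest.takeWhile (fun m => pvComp m == pvComp x)).map pvSuffix)
          :: pvEmit (rest.dropWhile (fun m => pvComp m == pvComp x)) := by
  rw [pvEmit.eq_def]

-- Chars-level: absorbing 'p ++ sep ++ q' as two join arguments.
theorem pvChars_join_merge (sep p q : List Char) (rest : List (List Char)) :
    PySem.Chars.join sep ((p ++ sep ++ q) :: rest) = PySem.Chars.join sep (p :: q :: rest) := by
  cases rest with
  | nil => simp [PySem.Chars.join_singleton, PySem.Chars.join_cons_cons]
  | cons c cs =>
      rw [PySem.Chars.join_cons_cons, PySem.Chars.join_cons_cons, PySem.Chars.join_cons_cons]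
      simp [List.append_assoc]

theorem pvChars_join_join2 (sep p q : List Char) (rest : List (List Char)) :
    PySem.Chars.join sep (PySem.Chars.join sep [p, q] :: rest)
      = PySem.Chars.join sep (p :: q :: rest) := by
  have h2 : PySem.Chars.join sep [p, q] = p ++ sep ++ q := by
    rw [PySem.Chars.join_cons_cons, PySem.Chars.join_singleton]
  rw [h2, pvChars_join_merge]

-- String-level: A's in-place merge of the last element equals adding one more join part.
theorem pvJoin_step (a b : String) (l : List String) :
    PySem.Str.join "." (PySem.Str.join "." [a, b] :: l) = PySem.Str.join "." (a :: b :: l) := by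
  unfold PySem.Str.join
  congr 1
  simp only [List.map_cons, List.map_nil, String.toList_ofList]
  exact pvChars_join_join2 _ _ _ _

theorem pvJoin_single (a : String) : PySem.Str.join "." [a] = a := by
  simp [PySem.Str.join, PySem.Chars.join_singleton]

-- The main invariant: starting from state (acc ++ [last], some key), A's fold over any
-- remaining items merges the leading run with key into 'last' and then behaves like pvEmit.
theorem pvFold_run (items : List String) :
    ∀ (acc : List String) (last key : String),
      (items.foldl pvStepA (acc ++ [last], some key)).1
        = acc ++ PySem.Str.join "."
              (last :: (items.takeWhile (fun m => pvComp m == key)).map pvSuffix)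
            :: pvEmit (items.dropWhile (fun m => pvComp m == key)) := by
  induction items with
  | nil =>
      intro acc last key
      simp [pvJoin_single, pvEmit_nil]
  | cons i rest ih =>
      intro acc last key
      by_cases h : pvComp i = key
      · have h' : (pvSplit i).head?.getD "" = key := by simpa [pvComp] using h
        have hb : (pvComp i == key) = true := by simp [h]
        have hstep : pvStepA (acc ++ [last], some key) i
            = (acc ++ [PySem.Str.join "." [last, pvSuffix i]], some key) := by
          unfold pvStepA
          simp [h', pvSuffix]
        simp only [List.foldl_cons]
        rw [hstep, ih, pvJoin_step]
        simp [hb]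
      · have h' : ¬ ((pvSplit i).head?.getD "" = key) := by simpa [pvComp] using h
        have hb : (pvComp i == key) = false := by simp [h]
        have hstep : pvStepA (acc ++ [last], some key) i
            = ((acc ++ [last]) ++ [i], some (pvComp i)) := by
          unfold pvStepA
          simp [h', pvComp]
        simp only [List.foldl_cons]
        rw [hstep, ih]
        simp only [List.takeWhile_cons, List.dropWhile_cons, hb, Bool.false_eq_true, if_false,
          List.map_nil]
        rw [pvEmit_cons]
        simp [pvJoin_single]

-- A's fold equals B's run-scanning emit on EVERY list (sortedness is not even needed).
theorem pvFold_eq_emit (items : List String) :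
    (items.foldl pvStepA ([], none)).1 = pvEmit items := by
  cases items with
  | nil => simp [pvEmit_nil]
  | cons x rest =>
      have hstep : pvStepA ([], none) x = ([x], some (pvComp x)) := by
        unfold pvStepA
        simp [pvComp]
      rw [List.foldl_cons, hstep]
      have := pvFold_run rest [] x (pvComp x)
      simp only [List.nil_append] at this
      rw [this, pvEmit_cons]

-- ===== VERDICT (by name: the statement is the Claim_ definition above) =====
theorem get_ser_fields_spec : Claim_equal_get_ser_fields := by
  intro ser_field _
  unfold Spec_get_ser_fields get_ser_fields_alt
  rw [get_ser_fields_eq_fold, pvFold_eq_emit]
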